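-- pv_equiv track=rewrite | github.com/davidvupham/dbtools | .devcontainer/scripts/sync_devcontainers.py | sync_keys
-- ===== SOURCE A (Python) =====
-- from collections import OrderedDict
-- from collections.abc import Iterable
--
-- def sync_keys(source: OrderedDict, target: OrderedDict, keys: Iterable[str]) -> bool:
--     modified = False
--     for key in keys:
--         if key in source:
--             src_value = source[key]
--             if target.get(key) != src_value:
--                 target[key] = src_value
--                 modified = True
--     return modified
-- ===== SOURCE B (Python) =====
-- def sync_keys(source, target, keys) -> bool:
--     # Inverted traversal: walk the SOURCE dict once and test each of its keys
--     # against a hash set of the requested keys, instead of walking `keys` and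
--     # probing `source`.  Return value is identical; new keys are appended to
--     # `target` in source order rather than in `keys` order (same final mapping).
--     wanted = set(keys)
--     changed = False
--     for k in source:
--         if k in wanted and target.get(k) != source[k]:
--             target[k] = source[k]
--             changed = True
--     return changed
-- ===== Notes on version B (the rewrite author's own statement) =====
-- stated objective: alternative
-- what changed: B inverts the traversal: it builds a set of the requested keys and iterates over the source dict, testing each source key for membership in that set, instead of A's loop over keys probing source; equivalence is about the return value (the final target mapping is identical, though new keys may be appended in source order rather than keys order).
import Mathlib
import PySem

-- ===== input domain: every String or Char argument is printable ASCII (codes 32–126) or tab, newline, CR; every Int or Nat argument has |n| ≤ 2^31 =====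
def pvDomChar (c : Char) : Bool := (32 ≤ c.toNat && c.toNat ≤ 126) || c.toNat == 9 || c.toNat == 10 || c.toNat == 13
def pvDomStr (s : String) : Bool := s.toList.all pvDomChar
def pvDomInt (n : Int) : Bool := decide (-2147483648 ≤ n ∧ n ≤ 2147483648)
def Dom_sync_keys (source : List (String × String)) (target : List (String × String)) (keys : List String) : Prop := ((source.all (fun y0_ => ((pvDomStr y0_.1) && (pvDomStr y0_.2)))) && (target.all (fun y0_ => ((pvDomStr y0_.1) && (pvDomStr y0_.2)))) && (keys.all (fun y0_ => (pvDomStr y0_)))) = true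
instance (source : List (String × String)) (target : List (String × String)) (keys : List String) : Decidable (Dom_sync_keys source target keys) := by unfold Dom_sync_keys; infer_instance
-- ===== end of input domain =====

-- B inverts the traversal: a set of the requested keys is built once and the SOURCE dict is
-- walked, instead of A's walk over `keys` probing `source`. Equivalence is about the return
-- value: in Python both leave `target` with the same final mapping, but B may append new
-- keys in source order rather than in `keys` order.

-- ===== PORT A =====
-- single loop over keys, mutating target and a `modified` flag inline
def sync_keys (source : List (String × String)) (target : List (String × String)) (keys : List String) : Bool :=
  (keys.foldl
    (fun (st : PySem.Dict String String × Bool) key =>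
      match (PySem.Dict.mk source).get? key with   -- `if key in source: src_value = source[key]`
      | some sv =>
          if st.1.get? key ≠ some sv then (st.1.insert key sv, true)  -- target[key] = src_value; modified = True
          else st
      | none => st)
    (PySem.Dict.mk target, false)).2

-- ===== PORT B =====
-- wanted = set(keys); then one loop over the source dict's keys
def sync_keys_alt (source : List (String × String)) (target : List (String × String)) (keys : List String) : Bool :=
  let wanted : PySem.Set String := PySem.Set.ofList keys
  let src := PySem.Dict.mk source
  (src.keys.foldl
    (fun (st : PySem.Dict String String × Bool) k =>
      if wanted.contains k && (st.1.get? k != src.get? k) then   -- `if k in wanted and target.get(k) != source[k]`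
        (st.1.insert k ((src.get? k).getD ""), true)             -- total form of source[k]: k is a key of src, so get? is some
      else st)
    (PySem.Dict.mk target, false)).2

-- ===== PRECONDITION & SPEC =====
def Spec_sync_keys (source : List (String × String)) (target : List (String × String)) (keys : List String) (out : Bool) : Prop := out = sync_keys_alt source target keys
instance (source : List (String × String)) (target : List (String × String)) (keys : List String) (out : Bool) : Decidable (Spec_sync_keys source target keys out) := by unfold Spec_sync_keys; infer_instance

-- ===== CLAIM (what is proved, stated in full; the proofs are below) =====
def Claim_equal_sync_keys : Prop := ∀ (source : List (String × String)) (target : List (String × String)) (keys : List String), Dom_sync_keys source target keys → Spec_sync_keys source target keys (sync_keys source target keys)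

-- ===== LEMMAS AND PROOFS =====

-- A's per-key condition, against a fixed target dict
def pvCond (src tgt : PySem.Dict String String) (k : String) : Bool :=
  match src.get? k with
  | some sv => decide (tgt.get? k ≠ some sv)
  | none => false

-- A's loop body
def pvStepA (src : PySem.Dict String String) (st : PySem.Dict String String × Bool) (key : String) :
    PySem.Dict String String × Bool :=
  match src.get? key with
  | some sv => if st.1.get? key ≠ some sv then (st.1.insert key sv, true) else st
  | none => st

-- B's loop body
def pvStepB (src : PySem.Dict String String) (wanted : PySem.Set String)
    (st : PySem.Dict String String × Bool) (k : String) : PySem.Dict String String × Bool :=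
  if wanted.contains k && (st.1.get? k != src.get? k) then
    (st.1.insert k ((src.get? k).getD ""), true)
  else st

lemma pvStepA_true (src : PySem.Dict String String) (keys : List String)
    (t : PySem.Dict String String) :
    (keys.foldl (pvStepA src) (t, true)).2 = true := by
  induction keys generalizing t with
  | nil => rfl
  | cons k rest ih =>
      simp only [List.foldl_cons, pvStepA]
      cases h : src.get? k with
      | none => exact ih t
      | some sv =>
          by_cases hc : t.get? k ≠ some sv
          · simp only [if_pos hc]; exact ih _
          · simp only [if_neg hc]; exact ih t

lemma pvLoopA_eq_any (src : PySem.Dict String String) (keys : List String)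
    (t : PySem.Dict String String) (m : Bool) :
    (keys.foldl (pvStepA src) (t, m)).2 = (m || keys.any (pvCond src t)) := by
  induction keys generalizing t m with
  | nil => simp
  | cons k rest ih =>
      simp only [List.foldl_cons, List.any_cons, pvStepA, pvCond]
      cases h : src.get? k with
      | none => simpa using ih t m
      | some sv =>
          by_cases hc : t.get? k ≠ some sv
          · simp only [if_pos hc, decide_eq_true hc]
            rw [pvStepA_true]
            simp
          · simp only [if_neg hc, decide_eq_false hc]
            simpa using ih t m

lemma pvStepB_true (src : PySem.Dict String String) (wanted : PySem.Set String)
    (ks : List String) (t : PySem.Dict String String) :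
    (ks.foldl (pvStepB src wanted) (t, true)).2 = true := by
  induction ks generalizing t with
  | nil => rfl
  | cons k rest ih =>
      simp only [List.foldl_cons, pvStepB]
      split
      · exact ih _
      · exact ih t

lemma pvLoopB_eq_any (src : PySem.Dict String String) (wanted : PySem.Set String)
    (ks : List String) (t : PySem.Dict String String) (m : Bool) :
    (ks.foldl (pvStepB src wanted) (t, m)).2
      = (m || ks.any (fun k => wanted.contains k && (t.get? k != src.get? k))) := by
  induction ks generalizing t m with
  | nil => simp
  | cons k rest ih =>
      simp only [List.foldl_cons, List.any_cons, pvStepB]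
      by_cases hc : (wanted.contains k && (t.get? k != src.get? k)) = true
      · rw [if_pos hc, pvStepB_true, hc]
        simp
      · simp only [if_neg hc]
        rw [ih]
        cases m <;> simp_all

-- the two "any"s agree: ∃ k ∈ keys with k a key of src and a differing value
-- ⟺ ∃ k among src's keys with k ∈ keys and a differing value
lemma pvAny_eq (src tgt : PySem.Dict String String) (keys : List String) :
    keys.any (pvCond src tgt)
      = src.keys.any (fun k => (PySem.Set.ofList keys).contains k && (tgt.get? k != src.get? k)) := by
  rw [Bool.eq_iff_iff]
  simp only [List.any_eq_true]
  constructor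
  · rintro ⟨k, hk, hc⟩
    unfold pvCond at hc
    cases h : src.get? k with
    | none => rw [h] at hc; exact absurd hc (by simp)
    | some sv =>
        rw [h] at hc
        have hne : tgt.get? k ≠ some sv := of_decide_eq_true hc
        refine ⟨k, ?_, ?_⟩
        · rw [← PySem.Dict.contains_iff_mem_keys, PySem.Dict.contains_eq_isSome_get?, h]
          rfl
        · simp [PySem.Set.mem_ofList, hk, h, bne_iff_ne, hne]
  · rintro ⟨k, hk, hc⟩
    have hc' : (PySem.Set.ofList keys).contains k = true ∧ (tgt.get? k != src.get? k) = true := by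
      simpa using hc
    have hmem : k ∈ keys :=
      (PySem.Set.mem_ofList keys k).1 ((PySem.Set.contains_iff (PySem.Set.ofList keys) k).1 hc'.1)
    have hs : src.contains k = true := (PySem.Dict.contains_iff_mem_keys _ _).2 hk
    rw [PySem.Dict.contains_eq_isSome_get?] at hs
    cases h : src.get? k with
    | none => rw [h] at hs; exact absurd hs (by simp)
    | some sv =>
        refine ⟨k, hmem, ?_⟩
        unfold pvCond
        rw [h]
        have hne := hc'.2
        rw [h, bne_iff_ne] at hne
        exact decide_eq_true hne

-- ===== VERDICT (by name: the statement is the Claim_ definition above) =====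
theorem sync_keys_spec : Claim_equal_sync_keys := by
  intro source target keys _
  unfold Spec_sync_keys sync_keys sync_keys_alt
  dsimp only
  rw [show (fun (st : PySem.Dict String String × Bool) key =>
      match (PySem.Dict.mk source).get? key with
      | some sv => if st.1.get? key ≠ some sv then (st.1.insert key sv, true) else st
      | none => st) = pvStepA (PySem.Dict.mk source) from rfl]
  rw [show (fun (st : PySem.Dict String String × Bool) k =>
      if (PySem.Set.ofList keys).contains k && (st.1.get? k != (PySem.Dict.mk source).get? k) then
        (st.1.insert k (((PySem.Dict.mk source).get? k).getD ""), true)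
      else st) = pvStepB (PySem.Dict.mk source) (PySem.Set.ofList keys) from rfl]
  rw [pvLoopA_eq_any, pvLoopB_eq_any]
  simp only [Bool.false_or]
  exact pvAny_eq _ _ _
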